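-- pv_equiv track=rewrite | github.com/abbasmoosajee07/AdventofCode | 2023/02/2023Day02.py | check_valid_games
-- ===== SOURCE A (Python) =====
-- def check_valid_games(game_dict):
--     all_valid_games, cubes_power = 0, 0
--
--     for game_no, cube_list in game_dict.items():  # Iterate through games
--         has_red, has_green, has_blue = True, True, True
--         min_red, min_green, min_blue = 0, 0, 0
--         for cube in cube_list:  # Iterate through the list of dictionaries
--             for color, count in cube.items():  # Check each cube's color and count
--                 color = color.lower()  # Ensure case-insensitivity
--
--                 if color == 'red':
--                     min_red = max(min_red, count)
--                 elif color == 'green':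
--                     min_green = max(min_green, count)
--                 elif color == 'blue':
--                     min_blue = max(min_blue, count)
--
--                 if has_red and has_green and has_blue:
--                     if color == 'red' and count > 12:
--                         has_red = False
--                     elif color == 'green' and count > 13:
--                         has_green = False
--                     elif color == 'blue' and count > 14:
--                         has_blue = False
--
--         cubes_power += min_red * min_green * min_blue
--         # If all conditions are met, the game is valid
--         if has_red and has_green and has_blue:
--             all_valid_games += game_no  # Add the game number to the total
--
--     return all_valid_games, cubes_power
-- ===== SOURCE B (Python) =====
-- def check_valid_games(game_dict):
--     def color_max(c, cubes):
--         return max([0] + [n for cube in cubes for col, n in cube.items() if col.lower() == c])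
--
--     all_valid_games, cubes_power = 0, 0
--     for game_no, cubes in game_dict.items():
--         r = color_max('red', cubes)
--         g = color_max('green', cubes)
--         b = color_max('blue', cubes)
--         cubes_power += r * g * b
--         if r <= 12 and g <= 13 and b <= 14:
--             all_valid_games += game_no
--     return all_valid_games, cubes_power
-- ===== Notes on version B (the rewrite author's own statement) =====
-- stated objective: simpler
-- what changed: Replaced A's single stateful pass with has_red/has_green/has_blue flags and incremental updates by per-color maximum aggregation over the flattened cube list, deriving validity directly from the three maxima being within 12/13/14.
import Mathlib
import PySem

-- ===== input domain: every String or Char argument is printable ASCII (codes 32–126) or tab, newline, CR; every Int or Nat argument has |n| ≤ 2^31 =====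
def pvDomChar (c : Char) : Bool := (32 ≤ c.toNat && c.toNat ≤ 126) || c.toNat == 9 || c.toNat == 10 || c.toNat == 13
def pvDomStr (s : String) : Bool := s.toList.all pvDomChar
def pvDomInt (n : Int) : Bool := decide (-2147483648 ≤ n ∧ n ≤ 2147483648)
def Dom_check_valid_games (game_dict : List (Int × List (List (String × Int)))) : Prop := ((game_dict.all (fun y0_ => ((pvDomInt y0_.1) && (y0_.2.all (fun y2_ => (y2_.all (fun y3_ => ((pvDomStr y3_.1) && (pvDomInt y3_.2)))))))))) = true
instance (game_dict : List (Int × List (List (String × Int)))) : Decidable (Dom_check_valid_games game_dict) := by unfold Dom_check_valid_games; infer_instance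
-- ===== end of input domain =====

-- B replaces A's stateful pass (three validity flags + incremental min_* updates) by
-- per-color maximum aggregation over the flattened cube list; objective: simpler.

-- ===== PORT A =====
-- inner-loop body of A: state (has_red, has_green, has_blue, min_red, min_green, min_blue)
def aStep (s : Bool × Bool × Bool × Int × Int × Int) (p : String × Int) :
    Bool × Bool × Bool × Int × Int × Int :=
  match s, p with
  | (hr, hg, hb, mr, mg, mb), (color0, count) =>
    let color := PySem.Str.lower color0
    let m :=
      if color = "red" then (max mr count, mg, mb)
      else if color = "green" then (mr, max mg count, mb)
      else if color = "blue" then (mr, mg, max mb count)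
      else (mr, mg, mb)
    let f :=
      if hr && hg && hb then
        if color = "red" ∧ count > 12 then (false, hg, hb)
        else if color = "green" ∧ count > 13 then (hr, false, hb)
        else if color = "blue" ∧ count > 14 then (hr, hg, false)
        else (hr, hg, hb)
      else (hr, hg, hb)
    (f.1, f.2.1, f.2.2, m.1, m.2.1, m.2.2)

def check_valid_games (game_dict : List (Int × List (List (String × Int)))) : Int × Int :=
  game_dict.foldl
    (fun acc g =>
      let s := g.2.foldl (fun st cube => cube.foldl aStep st)
                 (true, true, true, (0 : Int), (0 : Int), (0 : Int))
      let power := acc.2 + s.2.2.2.1 * s.2.2.2.2.1 * s.2.2.2.2.2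
      let valid := if s.1 && s.2.1 && s.2.2.1 then acc.1 + g.1 else acc.1
      (valid, power))
    (0, 0)

-- ===== PORT B =====
-- max([0] + [n for cube in cubes for col, n in cube.items() if col.lower() == c])
def colorMax (c : String) (cubes : List (List (String × Int))) : Int :=
  ((cubes.flatMap id).filterMap
      (fun p => if PySem.Str.lower p.1 = c then some p.2 else none)).foldl max 0

def check_valid_games_alt (game_dict : List (Int × List (List (String × Int)))) : Int × Int :=
  game_dict.foldl
    (fun acc g =>
      let r := colorMax "red" g.2
      let gr := colorMax "green" g.2
      let b := colorMax "blue" g.2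
      (if r ≤ 12 ∧ gr ≤ 13 ∧ b ≤ 14 then acc.1 + g.1 else acc.1, acc.2 + r * gr * b))
    (0, 0)

-- ===== PRECONDITION & SPEC =====
def Spec_check_valid_games (game_dict : List (Int × List (List (String × Int)))) (out : Int × Int) : Prop := out = check_valid_games_alt game_dict
instance (game_dict : List (Int × List (List (String × Int)))) (out : Int × Int) : Decidable (Spec_check_valid_games game_dict out) := by unfold Spec_check_valid_games; infer_instance

-- ===== CLAIM (what is proved, stated in full; the proofs are below) =====
def Claim_equal_check_valid_games : Prop := ∀ (game_dict : List (Int × List (List (String × Int)))), Dom_check_valid_games game_dict → Spec_check_valid_games game_dict (check_valid_games game_dict)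

-- ===== LEMMAS AND PROOFS =====

-- counts of pairs whose lowered color equals c, in order
def cnts (c : String) (ps : List (String × Int)) : List Int :=
  ps.filterMap (fun p => if PySem.Str.lower p.1 = c then some p.2 else none)

lemma step_red (hr hg hb : Bool) (mr mg mb n : Int) (c0 : String)
    (h : PySem.Str.lower c0 = "red") :
    aStep (hr, hg, hb, mr, mg, mb) (c0, n) =
      (hr && !(hr && hg && hb && decide (n > 12)), hg, hb, max mr n, mg, mb) := by
  simp only [aStep, h]
  cases hr <;> cases hg <;> cases hb <;> by_cases hn : n > 12 <;> simp [hn]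

lemma step_green (hr hg hb : Bool) (mr mg mb n : Int) (c0 : String)
    (h : PySem.Str.lower c0 = "green") :
    aStep (hr, hg, hb, mr, mg, mb) (c0, n) =
      (hr, hg && !(hr && hg && hb && decide (n > 13)), hb, mr, max mg n, mb) := by
  simp only [aStep, h]
  cases hr <;> cases hg <;> cases hb <;> by_cases hn : n > 13 <;> simp [hn]

lemma step_blue (hr hg hb : Bool) (mr mg mb n : Int) (c0 : String)
    (h : PySem.Str.lower c0 = "blue") :
    aStep (hr, hg, hb, mr, mg, mb) (c0, n) =
      (hr, hg, hb && !(hr && hg && hb && decide (n > 14)), mr, mg, max mb n) := by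
  simp only [aStep, h]
  cases hr <;> cases hg <;> cases hb <;> by_cases hn : n > 14 <;> simp [hn]

lemma step_other (hr hg hb : Bool) (mr mg mb n : Int) (c0 : String)
    (h1 : ¬ PySem.Str.lower c0 = "red") (h2 : ¬ PySem.Str.lower c0 = "green")
    (h3 : ¬ PySem.Str.lower c0 = "blue") :
    aStep (hr, hg, hb, mr, mg, mb) (c0, n) = (hr, hg, hb, mr, mg, mb) := by
  simp only [aStep, h1, h2, h3]
  cases hr <;> cases hg <;> cases hb <;> simp [h1, h2, h3]

set_option maxHeartbeats 1000000 in
lemma flags_invariant (ps : List (String × Int)) (hr hg hb : Bool) (mr mg mb : Int)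
    (h : (hr && hg && hb) = (decide (mr ≤ 12) && decide (mg ≤ 13) && decide (mb ≤ 14))) :
    (ps.foldl aStep (hr, hg, hb, mr, mg, mb)).2.2.2.1 = (cnts "red" ps).foldl max mr ∧
    (ps.foldl aStep (hr, hg, hb, mr, mg, mb)).2.2.2.2.1 = (cnts "green" ps).foldl max mg ∧
    (ps.foldl aStep (hr, hg, hb, mr, mg, mb)).2.2.2.2.2 = (cnts "blue" ps).foldl max mb ∧
    ((ps.foldl aStep (hr, hg, hb, mr, mg, mb)).1 &&
     (ps.foldl aStep (hr, hg, hb, mr, mg, mb)).2.1 &&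
     (ps.foldl aStep (hr, hg, hb, mr, mg, mb)).2.2.1) =
      (decide ((cnts "red" ps).foldl max mr ≤ 12) &&
       decide ((cnts "green" ps).foldl max mg ≤ 13) &&
       decide ((cnts "blue" ps).foldl max mb ≤ 14)) := by
  induction ps generalizing hr hg hb mr mg mb with
  | nil => simpa [cnts] using h
  | cons p rest ih =>
    obtain ⟨c0, n⟩ := p
    simp only [List.foldl_cons]
    by_cases hrd : PySem.Str.lower c0 = "red"
    · have hgn : ¬ PySem.Str.lower c0 = "green" := by rw [hrd]; decide
      have hbl : ¬ PySem.Str.lower c0 = "blue" := by rw [hrd]; decide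
      rw [step_red hr hg hb mr mg mb n c0 hrd]
      simp only [cnts, List.filterMap_cons, hrd, hgn, hbl, if_pos, if_neg, not_false_iff,
        List.foldl_cons]
      apply ih
      clear ih
      cases hr <;> cases hg <;> cases hb <;> simp [max_le_iff] at h ⊢ <;> first | omega | tauto | (obtain ⟨⟨ha, hb'⟩, hc⟩ := h; simp [ha, hb', hc, ← decide_not])
    · by_cases hgn : PySem.Str.lower c0 = "green"
      · have hbl : ¬ PySem.Str.lower c0 = "blue" := by rw [hgn]; decide
        rw [step_green hr hg hb mr mg mb n c0 hgn]
        simp only [cnts, List.filterMap_cons, hrd, hgn, hbl, if_pos, if_neg, not_false_iff,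
          List.foldl_cons]
        apply ih
        clear ih
        cases hr <;> cases hg <;> cases hb <;> simp [max_le_iff] at h ⊢ <;> first | omega | tauto | (obtain ⟨⟨ha, hb'⟩, hc⟩ := h; simp [ha, hb', hc, ← decide_not])
      · by_cases hbl : PySem.Str.lower c0 = "blue"
        · rw [step_blue hr hg hb mr mg mb n c0 hbl]
          simp only [cnts, List.filterMap_cons, hrd, hgn, hbl, if_pos, if_neg, not_false_iff,
            List.foldl_cons]
          apply ih
          clear ih
          cases hr <;> cases hg <;> cases hb <;> simp [max_le_iff] at h ⊢ <;> first | omega | tauto | (obtain ⟨⟨ha, hb'⟩, hc⟩ := h; simp [ha, hb', hc, ← decide_not])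
        · rw [step_other hr hg hb mr mg mb n c0 hrd hgn hbl]
          simp only [cnts, List.filterMap_cons, hrd, hgn, hbl, if_neg, not_false_iff]
          exact ih hr hg hb mr mg mb h

lemma foldl_flatten (cubes : List (List (String × Int))) (s : Bool × Bool × Bool × Int × Int × Int) :
    cubes.foldl (fun st cube => cube.foldl aStep st) s = (cubes.flatMap id).foldl aStep s := by
  induction cubes generalizing s with
  | nil => rfl
  | cons c cs ih => simp [List.foldl_append, ih]

lemma cnts_flatten (c : String) (cubes : List (List (String × Int))) :
    cnts c (cubes.flatMap id) =
      (cubes.flatMap id).filterMap (fun p => if PySem.Str.lower p.1 = c then some p.2 else none) := rfl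

lemma foldl_funext {α β : Type} (f g : β → α → β) (h : ∀ b a, f b a = g b a)
    (l : List α) (init : β) : l.foldl f init = l.foldl g init := by
  induction l generalizing init with
  | nil => rfl
  | cons x xs ih => simp only [List.foldl_cons, h, ih]

lemma per_game (g : Int × List (List (String × Int))) (acc : Int × Int) :
    (fun acc (g : Int × List (List (String × Int))) =>
      let s := g.2.foldl (fun st cube => cube.foldl aStep st)
                 (true, true, true, (0 : Int), (0 : Int), (0 : Int))
      let power := acc.2 + s.2.2.2.1 * s.2.2.2.2.1 * s.2.2.2.2.2
      let valid := if s.1 && s.2.1 && s.2.2.1 then acc.1 + g.1 else acc.1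
      ((valid, power) : Int × Int)) acc g =
    (fun acc (g : Int × List (List (String × Int))) =>
      let r := colorMax "red" g.2
      let gr := colorMax "green" g.2
      let b := colorMax "blue" g.2
      ((if r ≤ 12 ∧ gr ≤ 13 ∧ b ≤ 14 then acc.1 + g.1 else acc.1, acc.2 + r * gr * b) : Int × Int)) acc g := by
  have h := flags_invariant ((g.2.flatMap id)) true true true 0 0 0 (by decide)
  obtain ⟨h1, h2, h3, h4⟩ := h
  simp only [foldl_flatten]
  simp only [colorMax, ← cnts_flatten]
  simp only [h1, h2, h3, h4]
  simp [and_assoc]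

-- ===== VERDICT (by name: the statement is the Claim_ definition above) =====
theorem check_valid_games_spec : Claim_equal_check_valid_games := by
  intro gd _
  unfold Spec_check_valid_games check_valid_games check_valid_games_alt
  exact foldl_funext _ _ (fun acc g => per_game g acc) gd (0, 0)
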